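-- pv_equiv track=rewrite | github.com/github/spec-kit | src/spec_kit_mcp/onboarding.py | _classify_dependency_type
-- ===== SOURCE A (Python) =====
-- from typing import Any, Dict, List, Optional, Set, Tuple, Union
--
-- def _classify_dependency_type(feature_a: Dict[str, Any], feature_b: Dict[str, Any]) -> str:
--     """Classify the type of dependency between features."""
--     # This is a simplified classification - could be enhanced
--     external_refs = feature_a.get("external_references", [])
--
--     # Check for API dependencies
--     if any("api" in ref.lower() or "endpoint" in ref.lower() for ref in external_refs):
--         return "api_dependency"
--
--     # Check for data dependencies
--     if any("data" in ref.lower() or "model" in ref.lower() for ref in external_refs):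
--         return "data_dependency"
--
--     # Check for service dependencies
--     if any("service" in ref.lower() for ref in external_refs):
--         return "service_dependency"
--
--     return "code_dependency"
-- ===== SOURCE B (Python) =====
-- def _classify_dependency_type(feature_a, feature_b):
--     """Classify the type of dependency between features."""
--     has_api = has_data = has_service = False
--     for ref in feature_a.get("external_references", []):
--         low = ref.lower()
--         if "api" in low or "endpoint" in low:
--             has_api = True
--         if "data" in low or "model" in low:
--             has_data = True
--         if "service" in low:
--             has_service = True
--     if has_api:
--         return "api_dependency"
--     if has_data:
--         return "data_dependency"
--     if has_service:
--         return "service_dependency"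
--     return "code_dependency"
-- ===== Notes on version B (the rewrite author's own statement) =====
-- stated objective: alternative
-- what changed: Replaces A's three sequential any() generator scans (each lowercasing every ref again) with a single pass that lowercases each ref once and accumulates three boolean flags, deciding the priority order after the loop.
import Mathlib
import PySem

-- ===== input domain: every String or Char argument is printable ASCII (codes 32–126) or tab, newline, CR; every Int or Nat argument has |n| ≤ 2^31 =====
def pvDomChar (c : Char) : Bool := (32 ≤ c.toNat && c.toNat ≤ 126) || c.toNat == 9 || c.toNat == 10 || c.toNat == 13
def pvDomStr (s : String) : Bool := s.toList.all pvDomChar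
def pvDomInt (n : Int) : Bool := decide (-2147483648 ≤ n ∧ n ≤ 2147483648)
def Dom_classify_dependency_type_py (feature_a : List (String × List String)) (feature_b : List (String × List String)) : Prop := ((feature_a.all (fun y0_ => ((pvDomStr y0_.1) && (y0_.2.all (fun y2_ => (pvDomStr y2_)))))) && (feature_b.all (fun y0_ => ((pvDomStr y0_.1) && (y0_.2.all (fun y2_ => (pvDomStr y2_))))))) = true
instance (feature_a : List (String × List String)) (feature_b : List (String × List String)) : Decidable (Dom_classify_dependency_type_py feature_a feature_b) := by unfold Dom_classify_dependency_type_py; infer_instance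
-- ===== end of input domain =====

-- ===== PORT A =====
-- B replaces A's three sequential any()-scans over the refs with one pass
-- that lowercases each ref once and accumulates three flags (alternative decomposition).
def classify_dependency_type_py (feature_a : List (String × List String)) (feature_b : List (String × List String)) : String :=
  let external_refs := (((feature_a.find? (fun p => p.1 == "external_references")).map Prod.snd).getD [])
  if external_refs.any (fun ref => PySem.Str.isIn "api" (PySem.Str.lower ref) || PySem.Str.isIn "endpoint" (PySem.Str.lower ref)) then
    "api_dependency"
  else if external_refs.any (fun ref => PySem.Str.isIn "data" (PySem.Str.lower ref) || PySem.Str.isIn "model" (PySem.Str.lower ref)) then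
    "data_dependency"
  else if external_refs.any (fun ref => PySem.Str.isIn "service" (PySem.Str.lower ref)) then
    "service_dependency"
  else
    "code_dependency"

-- ===== PORT B =====
def classify_dependency_type_py_alt (feature_a : List (String × List String)) (feature_b : List (String × List String)) : String :=
  let flags := ((((feature_a.find? (fun p => p.1 == "external_references")).map Prod.snd).getD [])).foldl
    (fun (f : Bool × Bool × Bool) ref =>
      let low := PySem.Str.lower ref
      (f.1 || (PySem.Str.isIn "api" low || PySem.Str.isIn "endpoint" low),
       f.2.1 || (PySem.Str.isIn "data" low || PySem.Str.isIn "model" low),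
       f.2.2 || PySem.Str.isIn "service" low))
    (false, false, false)
  if flags.1 then "api_dependency"
  else if flags.2.1 then "data_dependency"
  else if flags.2.2 then "service_dependency"
  else "code_dependency"

-- ===== PRECONDITION & SPEC =====
def Spec_classify_dependency_type_py (feature_a : List (String × List String)) (feature_b : List (String × List String)) (out : String) : Prop := out = classify_dependency_type_py_alt feature_a feature_b
instance (feature_a : List (String × List String)) (feature_b : List (String × List String)) (out : String) : Decidable (Spec_classify_dependency_type_py feature_a feature_b out) := by unfold Spec_classify_dependency_type_py; infer_instance

-- ===== CLAIM (what is proved, stated in full; the proofs are below) =====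
def Claim_equal_classify_dependency_type_py : Prop := ∀ (feature_a : List (String × List String)) (feature_b : List (String × List String)), Dom_classify_dependency_type_py feature_a feature_b → Spec_classify_dependency_type_py feature_a feature_b (classify_dependency_type_py feature_a feature_b)

-- ===== LEMMAS AND PROOFS =====
theorem flags_foldl_eq (refs : List String) (a d s : Bool) :
    refs.foldl
      (fun (f : Bool × Bool × Bool) ref =>
        let low := PySem.Str.lower ref
        (f.1 || (PySem.Str.isIn "api" low || PySem.Str.isIn "endpoint" low),
         f.2.1 || (PySem.Str.isIn "data" low || PySem.Str.isIn "model" low),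
         f.2.2 || PySem.Str.isIn "service" low))
      (a, d, s)
    = (a || refs.any (fun ref => PySem.Str.isIn "api" (PySem.Str.lower ref) || PySem.Str.isIn "endpoint" (PySem.Str.lower ref)),
       d || refs.any (fun ref => PySem.Str.isIn "data" (PySem.Str.lower ref) || PySem.Str.isIn "model" (PySem.Str.lower ref)),
       s || refs.any (fun ref => PySem.Str.isIn "service" (PySem.Str.lower ref))) := by
  induction refs generalizing a d s with
  | nil => simp
  | cons r rs ih =>
    simp only [List.foldl_cons, List.any_cons, ih]
    simp [Bool.or_assoc]

-- ===== VERDICT (by name: the statement is the Claim_ definition above) =====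
theorem classify_dependency_type_py_spec : Claim_equal_classify_dependency_type_py := by
  intro fa fb _
  unfold Spec_classify_dependency_type_py classify_dependency_type_py classify_dependency_type_py_alt
  simp only [flags_foldl_eq, Bool.false_or]
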